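-- pv_equiv track=rewrite | github.com/bamanoz/tabula-bundles | coder-review/review/run.py | _commit_prefix
-- ===== SOURCE A (Python) =====
-- def _commit_prefix(paths: list[str]) -> str:
--     if not paths:
--         return "chore"
--     if any(p.startswith("docs/") or p.endswith(".md") for p in paths):
--         return "docs"
--     if any("test" in p.lower() for p in paths):
--         return "test"
--     if any(p.endswith((".yml", ".yaml", ".toml", ".json")) and ("ci" in p or ".github" in p) for p in paths):
--         return "ci"
--     return "feat"
-- ===== SOURCE B (Python) =====
-- def _commit_prefix(paths: list[str]) -> str:
--     if not paths:
--         return "chore"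
--     has_docs = has_test = has_ci = False
--     for p in paths:
--         has_docs = has_docs or p.startswith("docs/") or p.endswith(".md")
--         has_test = has_test or "test" in p.lower()
--         has_ci = has_ci or (p.endswith((".yml", ".yaml", ".toml", ".json"))
--                             and ("ci" in p or ".github" in p))
--     if has_docs:
--         return "docs"
--     if has_test:
--         return "test"
--     if has_ci:
--         return "ci"
--     return "feat"
-- ===== Notes on version B (the rewrite author's own statement) =====
-- stated objective: alternative
-- what changed: B replaces A's four separate short-circuiting any(...) scans over the list with one single loop that accumulates three boolean flags, followed by a priority decision chain.
import Mathlib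
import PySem

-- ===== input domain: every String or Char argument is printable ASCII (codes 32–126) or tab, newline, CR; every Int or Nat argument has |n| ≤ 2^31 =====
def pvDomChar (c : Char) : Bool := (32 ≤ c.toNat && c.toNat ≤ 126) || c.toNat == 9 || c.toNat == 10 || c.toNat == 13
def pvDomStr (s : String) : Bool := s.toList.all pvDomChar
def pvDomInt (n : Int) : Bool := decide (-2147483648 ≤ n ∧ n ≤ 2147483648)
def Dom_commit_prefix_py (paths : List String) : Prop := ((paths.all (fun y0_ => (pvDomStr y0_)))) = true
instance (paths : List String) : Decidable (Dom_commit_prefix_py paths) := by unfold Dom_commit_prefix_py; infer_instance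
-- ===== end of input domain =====

-- B replaces A's four separate short-circuiting any-scans with one loop accumulating three flags plus a decision chain; same cost.

-- shared path predicates (the per-path tests both Pythons write literally)
def pathDocs (p : String) : Bool :=
  PySem.Str.startswith p "docs/" || PySem.Str.endswith p ".md"
def pathTest (p : String) : Bool :=
  PySem.Str.isIn "test" (PySem.Str.lower p)
def pathCi (p : String) : Bool :=
  (PySem.Str.endswith p ".yml" || PySem.Str.endswith p ".yaml" ||
   PySem.Str.endswith p ".toml" || PySem.Str.endswith p ".json") &&
  (PySem.Str.isIn "ci" p || PySem.Str.isIn ".github" p)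

-- ===== PORT A =====
def commit_prefix_py (paths : List String) : String :=
  if paths.isEmpty then "chore"
  else if paths.any (fun p => pathDocs p) then "docs"
  else if paths.any (fun p => pathTest p) then "test"
  else if paths.any (fun p => pathCi p) then "ci"
  else "feat"

-- ===== PORT B =====
def cpFlagsStep (st : Bool × Bool × Bool) (p : String) : Bool × Bool × Bool :=
  (st.1 || pathDocs p, st.2.1 || pathTest p, st.2.2 || pathCi p)

def commit_prefix_py_alt (paths : List String) : String :=
  match paths with
  | [] => "chore"
  | _ =>
    let fl := paths.foldl cpFlagsStep (false, false, false)
    if fl.1 then "docs"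
    else if fl.2.1 then "test"
    else if fl.2.2 then "ci"
    else "feat"

-- ===== PRECONDITION & SPEC =====
def Spec_commit_prefix_py (paths : List String) (out : String) : Prop := out = commit_prefix_py_alt paths
instance (paths : List String) (out : String) : Decidable (Spec_commit_prefix_py paths out) := by unfold Spec_commit_prefix_py; infer_instance

-- ===== CLAIM (what is proved, stated in full; the proofs are below) =====
def Claim_equal_commit_prefix_py : Prop := ∀ (paths : List String), Dom_commit_prefix_py paths → Spec_commit_prefix_py paths (commit_prefix_py paths)

-- ===== LEMMAS AND PROOFS =====
theorem cpFlags_foldl (l : List String) (a b c : Bool) :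
    l.foldl cpFlagsStep (a, b, c) =
      (a || l.any (fun p => pathDocs p),
       b || l.any (fun p => pathTest p),
       c || l.any (fun p => pathCi p)) := by
  induction l generalizing a b c with
  | nil => simp
  | cons p t ih =>
      simp [List.foldl, cpFlagsStep, ih, Bool.or_assoc]

-- ===== VERDICT (by name: the statement is the Claim_ definition above) =====
theorem commit_prefix_py_spec : Claim_equal_commit_prefix_py := by
  intro paths _
  unfold Spec_commit_prefix_py commit_prefix_py commit_prefix_py_alt
  cases paths with
  | nil => rfl
  | cons p t =>
      rw [show List.foldl cpFlagsStep (false,false,false) (p::t) =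
            List.foldl cpFlagsStep (cpFlagsStep (false,false,false) p) t from rfl,
          show cpFlagsStep (false,false,false) p = (pathDocs p, pathTest p, pathCi p) by
            simp [cpFlagsStep],
          cpFlags_foldl]
      simp [List.any_cons]
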